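-- pv_equiv track=rewrite | github.com/dzpan0/IST-FProg | Proj1/Montanhas_Vales.py | obtem_montanhas
-- ===== SOURCE A (Python) =====
-- def ind_to_char(n):
--     """Converte index para letra
--
--     :param n: Inteiro correspondente ao index do caminho vertical no tuplo do território
--     :return: String correspondente à letra
--     """
--     salto = ord("A")
--     return chr(n + salto)
--
-- def obtem_montanhas(terr):
--     """Obtem todas as interseções ocupadas por montanhas do território
--
--     :param terr: Tuplo correspondente ao território onde será efetuado a procura
--     :return: Tuplo contendo todas as interseções ocupadas por montanhas do território,
--     ordenado à ordem de leitura de um território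
--     """
--     montanhas = ()
--
--     for ind_vert, c_vert in enumerate(terr):
--         if c_vert.count(1) == 0:  # Salta a iteração se o caminho vertical não conter montanhas
--             continue
--
--         letra_vert = ind_to_char(ind_vert)
--
--         for ind_horiz, c_horiz in enumerate(c_vert):
--             if c_horiz == 1:
--                 montanhas += ((letra_vert, ind_horiz + 1),)
--
--     return ordena_intersecoes(montanhas)
--
-- def ordena_intersecoes(intersecoes):
--     """Ordena um tuplo de interseções de acordo com a ordem de leitura de um território"""
--     return tuple(sorted(intersecoes, key=lambda x: (x[1], x[0])))
-- ===== SOURCE B (Python) =====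
-- def ind_to_char(n):
--     """Converte index para letra"""
--     return chr(n + ord("A"))
--
-- def obtem_montanhas(terr):
--     """Obtem todas as interseções ocupadas por montanhas, já em ordem de leitura:
--     percorre linha a linha (depois coluna a coluna), dispensando a ordenação final."""
--     nrows = max((len(c) for c in terr), default=0)
--     montanhas = []
--     for r in range(nrows):
--         for i, col in enumerate(terr):
--             if r < len(col) and col[r] == 1:
--                 montanhas.append((ind_to_char(i), r + 1))
--     return tuple(montanhas)
-- ===== Notes on version B (the rewrite author's own statement) =====
-- stated objective: alternative
-- what changed: B scans the grid row-major (rows outer, columns inner, guarding ragged columns by a length check), so the intersections are emitted already in reading order and the sorted()-based ordena_intersecoes pass is eliminated.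
import Mathlib
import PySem

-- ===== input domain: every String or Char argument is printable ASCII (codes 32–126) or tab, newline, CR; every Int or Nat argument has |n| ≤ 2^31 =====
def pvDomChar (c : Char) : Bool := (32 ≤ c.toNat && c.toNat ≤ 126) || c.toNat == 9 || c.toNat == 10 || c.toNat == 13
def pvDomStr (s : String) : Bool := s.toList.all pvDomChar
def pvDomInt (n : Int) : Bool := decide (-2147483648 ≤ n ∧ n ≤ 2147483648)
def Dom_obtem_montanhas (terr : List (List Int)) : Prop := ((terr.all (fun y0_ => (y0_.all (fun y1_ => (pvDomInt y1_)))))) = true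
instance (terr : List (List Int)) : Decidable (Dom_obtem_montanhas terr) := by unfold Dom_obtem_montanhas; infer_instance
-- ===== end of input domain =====

-- B replaces A's column-major collection followed by a sort with a single row-major scan that
-- produces the intersections already in reading order, so no sort is needed.

-- ===== PORT A =====
def ind_to_char (n : Int) : String := String.ofList [Char.ofNat (n + 65).toNat]

def ordena_intersecoes (intersecoes : List (String × Int)) : List (String × Int) :=
  PySem.List.sorted2 intersecoes (fun x => x.2) (fun x => x.1)

def obtem_montanhas (terr : List (List Int)) : List (String × Int) :=
  let montanhas :=
    (PySem.List.enumerate terr).foldl (fun acc p =>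
      if PySem.List.count p.2 1 = 0 then acc
      else
        let letra := ind_to_char p.1
        (PySem.List.enumerate p.2).foldl
          (fun acc2 q => if q.2 = 1 then acc2 ++ [(letra, q.1 + 1)] else acc2) acc) []
  ordena_intersecoes montanhas

-- ===== PORT B =====
def obtem_montanhas_alt (terr : List (List Int)) : List (String × Int) :=
  let nrows := PySem.List.maxD (terr.map (fun c => (c.length : Int))) (fun x => x) 0
  (PySem.List.pyRange 0 nrows).foldl (fun acc r =>
    (PySem.List.enumerate terr).foldl (fun acc2 p =>
      if r < (p.2.length : Int) ∧ PySem.List.pyGetD p.2 r 0 = 1 then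
        acc2 ++ [(ind_to_char p.1, r + 1)]
      else acc2) acc) []

-- ===== PRECONDITION & SPEC =====
-- Pre_ excludes only grids where some column CONTAINING A MOUNTAIN has an index whose letter
-- chr(i+65) is no value of the Lean String type or raises: for indices 55231–57278 Python's chr
-- returns a lone-surrogate string, which is not a Unicode scalar value and has no Lean String
-- counterpart (A and B agree on it in Python), and for indices ≥ 1114047 chr raises ValueError
-- in both A and B.
def Pre_obtem_montanhas (terr : List (List Int)) : Prop :=
  ∀ i, (h : i < terr.length) → (1 : Int) ∈ terr[i] →
    i + 65 < 55296 ∨ (57343 < i + 65 ∧ i + 65 < 1114112)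
instance (terr : List (List Int)) : Decidable (Pre_obtem_montanhas terr) := by unfold Pre_obtem_montanhas; infer_instance
def pvWitness_obtem_montanhas : List (List Int) := [[1, 0], [0, 1], [0, 0]]

def Spec_obtem_montanhas (terr : List (List Int)) (out : List (String × Int)) : Prop := out = obtem_montanhas_alt terr
instance (terr : List (List Int)) (out : List (String × Int)) : Decidable (Spec_obtem_montanhas terr out) := by unfold Spec_obtem_montanhas; infer_instance

-- ===== CLAIM (what is proved, stated in full; the proofs are below) =====
def Claim_equal_obtem_montanhas : Prop := ∀ (terr : List (List Int)), Dom_obtem_montanhas terr → Pre_obtem_montanhas terr → Spec_obtem_montanhas terr (obtem_montanhas terr)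

-- ===== LEMMAS AND PROOFS =====

-- the items A collects from the column p = (index, cells)
def colItems (p : Int × List Int) : List (String × Int) :=
  ((PySem.List.enumerate p.2).filter (fun q => q.2 == 1)).map (fun q => (ind_to_char p.1, q.1 + 1))

-- the items B collects in the row r
def rowItems (terr : List (List Int)) (r : Int) : List (String × Int) :=
  ((PySem.List.enumerate terr).filter
      (fun p => decide (r < (p.2.length : Int)) && decide (PySem.List.pyGetD p.2 r 0 = 1))).map
    (fun p => (ind_to_char p.1, r + 1))

def nrowsOf (terr : List (List Int)) : Int :=
  PySem.List.maxD (terr.map (fun c => (c.length : Int))) (fun x => x) 0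

lemma A_unfold (terr : List (List Int)) :
    obtem_montanhas terr =
      PySem.List.sorted2 ((PySem.List.enumerate terr).flatMap colItems)
        (fun x => x.2) (fun x => x.1) := by
  show ordena_intersecoes _ = _
  have hbody : (fun (acc : List (String × Int)) (p : Int × List Int) =>
      if PySem.List.count p.2 1 = 0 then acc
      else
        let letra := ind_to_char p.1
        (PySem.List.enumerate p.2).foldl
          (fun acc2 q => if q.2 = 1 then acc2 ++ [(letra, q.1 + 1)] else acc2) acc)
      = fun acc p => acc ++ colItems p := by
    funext acc p
    have hin : ∀ (acc2 : List (String × Int)),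
        (PySem.List.enumerate p.2).foldl
          (fun acc2 q => if q.2 = 1 then acc2 ++ [(ind_to_char p.1, q.1 + 1)] else acc2) acc2
        = acc2 ++ colItems p := by
      intro acc2
      have : (fun (acc2 : List (String × Int)) (q : Int × Int) =>
          if q.2 = 1 then acc2 ++ [(ind_to_char p.1, q.1 + 1)] else acc2)
          = fun acc2 q => if (fun (q : Int × Int) => q.2 == 1) q = true
              then acc2 ++ [(ind_to_char p.1, q.1 + 1)] else acc2 := by
        funext a q; by_cases h : q.2 = 1 <;> simp [h]
      rw [this, PySem.List.foldl_append_if]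
      rfl
    by_cases hc : PySem.List.count p.2 1 = 0
    · have : colItems p = [] := by
        have h1 : (1 : Int) ∉ p.2 := by
          rwa [PySem.List.count_eq, List.count_eq_zero] at hc
        unfold colItems
        rw [List.filter_eq_nil_iff.mpr, List.map_nil]
        intro q hq
        rw [PySem.List.mem_enumerate_iff] at hq
        obtain ⟨k, hk, rfl⟩ := hq
        simp only [beq_iff_eq]
        intro h; exact h1 (h ▸ List.getElem_mem hk)
      rw [if_pos hc, this, List.append_nil]
    · simp only [hc, if_false]
      exact hin acc
  rw [hbody, PySem.List.foldl_append_eq_flatMap, List.nil_append]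
  rfl

lemma B_unfold (terr : List (List Int)) :
    obtem_montanhas_alt terr =
      (PySem.List.pyRange 0 (nrowsOf terr)).flatMap (rowItems terr) := by
  show (PySem.List.pyRange 0 (nrowsOf terr)).foldl (fun acc r =>
    (PySem.List.enumerate terr).foldl (fun acc2 p =>
      if r < (p.2.length : Int) ∧ PySem.List.pyGetD p.2 r 0 = 1 then
        acc2 ++ [(ind_to_char p.1, r + 1)]
      else acc2) acc) [] = _
  have hbody : (fun (acc : List (String × Int)) (r : Int) =>
      (PySem.List.enumerate terr).foldl (fun acc2 p =>
        if r < (p.2.length : Int) ∧ PySem.List.pyGetD p.2 r 0 = 1 then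
          acc2 ++ [(ind_to_char p.1, r + 1)]
        else acc2) acc) = fun acc r => acc ++ rowItems terr r := by
    funext acc r
    have : (fun (acc2 : List (String × Int)) (p : Int × List Int) =>
        if r < (p.2.length : Int) ∧ PySem.List.pyGetD p.2 r 0 = 1 then
          acc2 ++ [(ind_to_char p.1, r + 1)]
        else acc2)
        = fun acc2 p => if (fun (p : Int × List Int) =>
            decide (r < (p.2.length : Int)) && decide (PySem.List.pyGetD p.2 r 0 = 1)) p = true
            then acc2 ++ [(ind_to_char p.1, r + 1)] else acc2 := by
      funext a p
      by_cases h : r < (p.2.length : Int) ∧ PySem.List.pyGetD p.2 r 0 = 1 <;> simp [h]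
    rw [this, PySem.List.foldl_append_if]
    rfl
  rw [hbody, PySem.List.foldl_append_eq_flatMap, List.nil_append]

lemma before_eq {α κ₁ κ₂ : Type} [LinearOrder κ₁] [LinearOrder κ₂] (k1 : α → κ₁) (k2 : α → κ₂) :
    (fun a b => decide (k1 a < k1 b) || (!decide (k1 b < k1 a) && decide (k2 a < k2 b)))
      = fun a b => decide (toLex (k1 a, k2 a) < toLex (k1 b, k2 b)) := by
  funext a b
  by_cases h1 : k1 a < k1 b
  · simp [h1, Prod.Lex.lt_iff]
  · by_cases h2 : k1 b < k1 a
    · simp [Prod.Lex.lt_iff, h1, h2, ne_of_gt h2]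
    · have he : k1 a = k1 b := le_antisymm (not_lt.mp h2) (not_lt.mp h1)
      simp [Prod.Lex.lt_iff, he]

lemma sorted2_eq_sorted_lex {α κ₁ κ₂ : Type} [LinearOrder κ₁] [LinearOrder κ₂]
    (xs : List α) (k1 : α → κ₁) (k2 : α → κ₂) :
    PySem.List.sorted2 xs k1 k2 = PySem.List.sorted xs (fun x => toLex (k1 x, k2 x)) := by
  rw [PySem.List.sorted_eq_foldl_insertBy]
  show xs.foldl (fun acc x =>
      PySem.List.insertBy (fun a b =>
        decide (k1 a < k1 b) || (!decide (k1 b < k1 a) && decide (k2 a < k2 b))) x acc) [] = _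
  rw [before_eq k1 k2]

lemma ind_to_char_lt {i j : Int} (h0 : 0 ≤ i) (hij : i < j)
    (hvi : Nat.isValidChar (i + 65).toNat) (hvj : Nat.isValidChar (j + 65).toNat) :
    ind_to_char i < ind_to_char j := by
  have bi : (i + 65).toNat < 1114112 := by rcases hvi with h | h <;> omega
  have bj : (j + 65).toNat < 1114112 := by rcases hvj with h | h <;> omega
  rw [ind_to_char, ind_to_char, String.lt_iff_toList_lt, String.toList_ofList,
    String.toList_ofList, List.cons_lt_cons_iff]
  left
  rw [Char.lt_def, Char.ofNat, Char.ofNat, dif_pos hvi, dif_pos hvj]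
  simp only [Char.ofNatAux]
  exact UInt32.lt_iff_toNat_lt .. |>.mpr (by simp; omega)

lemma enum_bounds {terr : List (List Int)} {p : Int × List Int}
    (hp : p ∈ PySem.List.enumerate terr) : 0 ≤ p.1 ∧ p.1 < (terr.length : Int) := by
  rw [PySem.List.mem_enumerate_iff] at hp
  obtain ⟨k, hk, rfl⟩ := hp
  constructor <;> simp <;> omega

-- under Pre_, any column with a mountain has a letter the Lean Char can carry
lemma valid_of_pre {terr : List (List Int)} (hpre : Pre_obtem_montanhas terr)
    {p : Int × List Int} (hp : p ∈ PySem.List.enumerate terr) (h1 : (1 : Int) ∈ p.2) :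
    Nat.isValidChar (p.1 + 65).toNat := by
  rw [PySem.List.mem_enumerate_iff] at hp
  obtain ⟨k, hk, rfl⟩ := hp
  have := hpre k hk (by simpa using h1)
  have he : (((0 : Int) + k) + 65).toNat = k + 65 := by omega
  rw [he]
  rcases this with h | h
  · exact Or.inl (by omega)
  · exact Or.inr ⟨by omega, by omega⟩

lemma one_mem_of_colItem {p : Int × List Int} {x : String × Int}
    (hx : x ∈ colItems p) : (1 : Int) ∈ p.2 := by
  unfold colItems at hx
  simp only [List.mem_map, List.mem_filter, beq_iff_eq] at hx
  obtain ⟨q, ⟨hq, hq1⟩, -⟩ := hx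
  rw [PySem.List.mem_enumerate_iff] at hq
  obtain ⟨k, hk, rfl⟩ := hq
  exact hq1 ▸ List.getElem_mem hk

lemma one_mem_of_rowHit {r : Int} (hr0 : 0 ≤ r) {p : Int × List Int}
    (hlen : r < (p.2.length : Int)) (hget : PySem.List.pyGetD p.2 r 0 = 1) :
    (1 : Int) ∈ p.2 := by
  rw [PySem.List.pyGetD_eq_getElem _ _ hr0 hlen] at hget
  exact hget ▸ List.getElem_mem (by omega)

lemma len_le_nrows (terr : List (List Int)) {i : Nat} (hi : i < terr.length) :
    (terr[i].length : Int) ≤ nrowsOf terr :=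
  PySem.List.le_maxD_id _ 0 _ (List.mem_map.mpr ⟨terr[i], List.getElem_mem hi, rfl⟩)

lemma nrows_nonneg (terr : List (List Int)) : 0 ≤ nrowsOf terr := by
  unfold nrowsOf
  rcases terr with - | ⟨c, t⟩
  · simp [PySem.List.maxD_nil]
  · have h := PySem.List.maxD_mem ((c :: t).map (fun c => (c.length : Int))) (fun x => x) 0 (by simp)
    simp only [List.mem_map] at h
    obtain ⟨u, -, hu⟩ := h
    rw [← hu]; positivity

lemma pairwise_pyRange (n : Int) (hn : 0 ≤ n) :
    List.Pairwise (· < ·) (PySem.List.pyRange 0 n) := by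
  have : n = (n.toNat : Int) := by omega
  rw [this, PySem.List.pyRange_zero_natCast, List.pairwise_map]
  exact List.pairwise_lt_range.imp (by intro a b h; omega)

lemma mem_montA (terr : List (List Int)) (x : String × Int) :
    x ∈ (PySem.List.enumerate terr).flatMap colItems ↔
      ∃ i : Nat, ∃ _ : i < terr.length, ∃ r : Nat, ∃ _ : r < terr[i].length,
        terr[i][r] = 1 ∧ x = (ind_to_char i, (r : Int) + 1) := by
  simp only [List.mem_flatMap]
  constructor
  · rintro ⟨p, hp, hx⟩
    rw [PySem.List.mem_enumerate_iff] at hp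
    obtain ⟨i, hi, rfl⟩ := hp
    unfold colItems at hx
    simp only [List.mem_map, List.mem_filter, beq_iff_eq] at hx
    obtain ⟨q, ⟨hq, hq1⟩, rfl⟩ := hx
    rw [PySem.List.mem_enumerate_iff] at hq
    obtain ⟨r, hr, rfl⟩ := hq
    exact ⟨i, hi, r, hr, hq1, by simp⟩
  · rintro ⟨i, hi, r, hr, h1, rfl⟩
    refine ⟨((i : Int), terr[i]), ?_, ?_⟩
    · rw [PySem.List.mem_enumerate_iff]; exact ⟨i, hi, by simp⟩
    · unfold colItems
      simp only [List.mem_map, List.mem_filter, beq_iff_eq]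
      refine ⟨((r : Int), terr[i][r]), ⟨?_, h1⟩, by simp⟩
      rw [PySem.List.mem_enumerate_iff]; exact ⟨r, hr, by simp⟩

lemma mem_rowList (terr : List (List Int)) (x : String × Int) :
    x ∈ (PySem.List.pyRange 0 (nrowsOf terr)).flatMap (rowItems terr) ↔
      ∃ i : Nat, ∃ _ : i < terr.length, ∃ r : Nat, ∃ _ : r < terr[i].length,
        terr[i][r] = 1 ∧ x = (ind_to_char i, (r : Int) + 1) := by
  simp only [List.mem_flatMap]
  constructor
  · rintro ⟨r, hrng, hx⟩
    rw [PySem.List.mem_pyRange_one] at hrng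
    unfold rowItems at hx
    simp only [List.mem_map, List.mem_filter, Bool.and_eq_true, decide_eq_true_eq] at hx
    obtain ⟨p, ⟨hp, hlen, hget⟩, rfl⟩ := hx
    rw [PySem.List.mem_enumerate_iff] at hp
    obtain ⟨i, hi, rfl⟩ := hp
    simp only at hlen hget ⊢
    rw [PySem.List.pyGetD_eq_getElem _ _ hrng.1 hlen] at hget
    refine ⟨i, hi, r.toNat, by omega, hget, by simp; omega⟩
  · rintro ⟨i, hi, r, hr, h1, rfl⟩
    refine ⟨(r : Int), ?_, ?_⟩
    · rw [PySem.List.mem_pyRange_one]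
      have := len_le_nrows terr hi
      constructor <;> [positivity; omega]
    · unfold rowItems
      simp only [List.mem_map, List.mem_filter, Bool.and_eq_true, decide_eq_true_eq]
      refine ⟨((i : Int), terr[i]), ⟨?_, by simp [hr], ?_⟩, by simp⟩
      · rw [PySem.List.mem_enumerate_iff]; exact ⟨i, hi, by simp⟩
      · simp only
        rw [PySem.List.pyGetD_eq_getElem _ _ (by positivity) (by simpa using hr)]
        simpa using h1

lemma pairwise_rowList (terr : List (List Int)) (hpre : Pre_obtem_montanhas terr) :
    ((PySem.List.pyRange 0 (nrowsOf terr)).flatMap (rowItems terr)).Pairwise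
      (fun a b => (fun x : String × Int => toLex (x.2, x.1)) a < (fun x : String × Int => toLex (x.2, x.1)) b) := by
  rw [List.pairwise_flatMap]
  constructor
  · intro r hrng
    have hr0 : 0 ≤ r := (PySem.List.mem_pyRange_one.mp hrng).1
    unfold rowItems
    rw [List.pairwise_map]
    refine ((PySem.List.pairwise_lt_enumerate terr 0).filter _).imp_of_mem ?_
    intro p q hp hq hlt
    have hbp := enum_bounds (List.mem_of_mem_filter hp)
    have hcp := List.of_mem_filter hp
    have hcq := List.of_mem_filter hq
    simp only [Bool.and_eq_true, decide_eq_true_eq] at hcp hcq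
    have hvp := valid_of_pre hpre (List.mem_of_mem_filter hp) (one_mem_of_rowHit hr0 hcp.1 hcp.2)
    have hvq := valid_of_pre hpre (List.mem_of_mem_filter hq) (one_mem_of_rowHit hr0 hcq.1 hcq.2)
    simp only
    rw [Prod.Lex.lt_iff]
    right
    exact ⟨rfl, ind_to_char_lt hbp.1 hlt hvp hvq⟩
  · refine (pairwise_pyRange _ (nrows_nonneg terr)).imp_of_mem ?_
    intro r1 r2 _ _ hlt x hx y hy
    unfold rowItems at hx hy
    simp only [List.mem_map] at hx hy
    obtain ⟨p, _, rfl⟩ := hx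
    obtain ⟨q, _, rfl⟩ := hy
    simp only
    rw [Prod.Lex.lt_iff]
    left
    simpa using by omega

lemma nodup_montA (terr : List (List Int)) (hpre : Pre_obtem_montanhas terr) :
    ((PySem.List.enumerate terr).flatMap colItems).Nodup := by
  rw [List.nodup_flatMap]
  constructor
  · intro p _
    unfold colItems
    rw [List.Nodup, List.pairwise_map]
    refine ((PySem.List.pairwise_lt_enumerate p.2 0).filter _).imp ?_
    intro a b h
    simp only [ne_eq, Prod.mk.injEq, not_and]
    intro _; omega
  · refine (PySem.List.pairwise_lt_enumerate terr 0).imp_of_mem ?_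
    intro p q hp hq hlt
    have hbp := enum_bounds hp
    intro x hxp hxq
    have hvp := valid_of_pre hpre hp (one_mem_of_colItem hxp)
    have hvq := valid_of_pre hpre hq (one_mem_of_colItem hxq)
    unfold colItems at hxp hxq
    simp only [List.mem_map] at hxp hxq
    obtain ⟨a, -, ha⟩ := hxp
    obtain ⟨b, -, hb⟩ := hxq
    have : ind_to_char p.1 = ind_to_char q.1 := by
      rw [← ha] at hb; exact (congrArg Prod.fst hb).symm
    exact absurd this (ne_of_lt (ind_to_char_lt hbp.1 hlt hvp hvq))

-- ===== VERDICT (by name: the statement is the Claim_ definition above) =====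
theorem obtem_montanhas_spec : Claim_equal_obtem_montanhas := by
  intro terr _ hpre
  unfold Spec_obtem_montanhas
  rw [A_unfold, B_unfold, sorted2_eq_sorted_lex]
  refine PySem.List.sorted_eq_of_perm_of_pairwise_lt _ _ _ ?_ (pairwise_rowList terr hpre)
  refine (List.perm_ext_iff_of_nodup ?_ (nodup_montA terr hpre)).mpr ?_
  · exact (pairwise_rowList terr hpre).imp (fun h => by intro he; rw [he] at h; exact lt_irrefl _ h)
  · intro a; rw [mem_montA, mem_rowList]
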